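-- pv_equiv track=rewrite | github.com/makeling/arcgis-server-custom-python-tools | testing_tool_for_ags_map_services/testing_tool_for_ags_services.py | printSplitLine
-- ===== SOURCE A (Python) =====
-- def printSplitLine(comment):
--     splitline = ""
--     count = 0
--     for i in range(50):
--         splitline += "-"
--         count +=1
--         if count == 25:
--             splitline += comment
--
--
--     return (splitline + "\n")
-- ===== SOURCE B (Python) =====
-- def printSplitLine(comment):
--     return "-" * 25 + comment + "-" * 25 + "\n"
-- ===== Notes on version B (the rewrite author's own statement) =====
-- stated objective: simpler
-- what changed: Replaces the 50-iteration loop with counter and conditional midway insertion by a single closed-form concatenation of 25 dashes, the comment, 25 dashes and a trailing newline.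
import Mathlib
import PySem

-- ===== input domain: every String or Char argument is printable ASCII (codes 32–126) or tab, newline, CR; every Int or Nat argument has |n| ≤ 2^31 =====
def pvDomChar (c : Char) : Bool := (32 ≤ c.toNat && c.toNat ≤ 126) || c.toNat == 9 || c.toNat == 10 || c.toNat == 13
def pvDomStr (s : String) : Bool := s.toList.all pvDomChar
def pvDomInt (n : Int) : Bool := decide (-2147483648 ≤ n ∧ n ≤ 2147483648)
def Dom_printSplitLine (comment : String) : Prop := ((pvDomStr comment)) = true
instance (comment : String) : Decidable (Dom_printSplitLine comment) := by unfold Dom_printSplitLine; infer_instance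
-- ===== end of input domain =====

-- B replaces A's 50-step loop with counter by a closed-form concatenation; objective: simpler.


-- ===== PORT A =====
-- literal transliteration: loop over range(50), state = (splitline, count)
def printSplitLine (comment : String) : String :=
  let st := (PySem.List.pyRange 0 50 1).foldl
    (fun (st : String × Int) _ =>
      let splitline := st.1 ++ "-"
      let count := st.2 + 1
      let splitline := if count == 25 then splitline ++ comment else splitline
      (splitline, count))
    ("", 0)
  st.1 ++ "\n"

-- ===== PORT B =====
def printSplitLine_alt (comment : String) : String :=
  String.ofList (List.replicate 25 '-') ++ comment ++ String.ofList (List.replicate 25 '-') ++ "\n"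

-- ===== PRECONDITION & SPEC =====
def Spec_printSplitLine (comment : String) (out : String) : Prop := out = printSplitLine_alt comment
instance (comment : String) (out : String) : Decidable (Spec_printSplitLine comment out) := by unfold Spec_printSplitLine; infer_instance

-- ===== CLAIM (what is proved, stated in full; the proofs are below) =====
def Claim_equal_printSplitLine : Prop := ∀ (comment : String), Dom_printSplitLine comment → Spec_printSplitLine comment (printSplitLine comment)

-- ===== LEMMAS AND PROOFS =====

-- ===== VERDICT (by name: the statement is the Claim_ definition above) =====
theorem printSplitLine_spec : Claim_equal_printSplitLine := by
  intro comment _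
  show printSplitLine comment = printSplitLine_alt comment
  simp [printSplitLine, printSplitLine_alt, PySem.List.pyRange, List.range_succ, List.foldl, ← String.toList_inj, String.toList_append]
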